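-- pv_equiv track=rewrite | github.com/O-Huslin/YOUBA-Project | Tests/test run.py | cycles
-- ===== SOURCE A (Python) =====
-- def front(q):
--     return q[0]
--
-- def cycles(lst, c, t):
--     c = int(c)
--     t = int(t)
--     for i in lst:
--         while front(i) > c:
--             if front(i) <= c:
--                 return front(i) + t
--             else:
--                 i[0] -= c
--                 t += 10
--     return t - front(min(lst))
-- ===== SOURCE B (Python) =====
-- # B: one pass: closed-form division replaces A's repeated subtraction, and a running
-- # minimum of the updated heads replaces min(): the lexicographic minimum's first
-- # element is just the smallest first element.
-- # Note: A mutates the inner lists of lst in place; B does not (return value only).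
-- def cycles(lst, c, t):
--     c = int(c)
--     t = int(t)
--     best = None
--     for i in lst:
--         v = i[0]
--         if v > c:
--             k = -((c - v) // c)      # = ceil((v - c) / c): number of subtractions A performs
--             t += 10 * k
--             v -= k * c
--         if best is None or v < best:
--             best = v
--     return t - best
-- ===== Notes on version B (the rewrite author's own statement) =====
-- stated objective: alternative
-- what changed: B replaces A's repeated-subtraction while loop by one closed-form ceiling division per inner list and replaces the final lexicographic min() pass and all list mutation by a running minimum of the updated heads (the lexicographic minimum's first element is the smallest first element).
import Mathlib
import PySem

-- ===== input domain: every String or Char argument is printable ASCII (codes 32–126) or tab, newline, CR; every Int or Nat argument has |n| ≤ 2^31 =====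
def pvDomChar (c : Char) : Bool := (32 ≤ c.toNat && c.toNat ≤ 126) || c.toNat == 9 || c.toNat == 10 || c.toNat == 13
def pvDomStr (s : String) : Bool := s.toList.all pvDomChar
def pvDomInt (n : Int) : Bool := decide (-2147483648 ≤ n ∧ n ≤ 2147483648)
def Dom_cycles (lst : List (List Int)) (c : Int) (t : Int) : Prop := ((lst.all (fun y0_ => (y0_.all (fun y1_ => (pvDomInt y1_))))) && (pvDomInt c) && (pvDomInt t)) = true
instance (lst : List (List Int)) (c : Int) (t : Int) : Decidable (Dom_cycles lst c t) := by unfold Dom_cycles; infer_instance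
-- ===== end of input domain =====

-- B replaces A's repeated-subtraction while loop by one closed-form ceiling
-- division per inner list and the final lexicographic min() pass by a running
-- minimum of the updated heads (objective: alternative).  A mutates the inner
-- lists of lst in place; B does not; the equivalence proved is about the return
-- value only.

-- front(q) = q[0]; the .getD 0 is unreachable under Pre_ (q nonempty there)
def pvFront (q : List Int) : Int := (PySem.List.pyGet? q 0).getD 0

-- Python's builtin min on a list of int-lists (first minimal element, Python's
-- lexicographic list comparison); shared by both ports as min is shared by both Pythons.
def pyListLt : List Int → List Int → Bool
  | [], [] => false
  | [], _ :: _ => true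
  | _ :: _, [] => false
  | a :: as, b :: bs => if a < b then true else if b < a then false else pyListLt as bs

def pyMin (xs : List (List Int)) : List Int :=
  match xs with
  | [] => []   -- Python raises ValueError on min([]); excluded by Pre_
  | x :: rest => rest.foldl (fun m y => if pyListLt y m then y else m) x


theorem pvFront_cons (x : Int) (l : List Int) : pvFront (x :: l) = x := by
  simp [pvFront, PySem.List.pyGet?, PySem.List.pyIdx?]

-- ===== PORT A =====
-- A's while loop: first component = the early return (Python's dead `if front(i) <= c`
-- branch, kept literally), then the mutated list i and the updated t.
-- The `0 < c` conjunct is a totality guard only: when c ≤ 0 and front i > c the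
-- Python loop diverges (those inputs are outside Pre_).
def pvWhileA (c : Int) (i : List Int) (t : Int) : Option Int × List Int × Int :=
  if _h : pvFront i > c ∧ 0 < c then
    if pvFront i ≤ c then (some (pvFront i + t), i, t)
    else pvWhileA c ((pvFront i - c) :: i.tail) (t + 10)   -- i[0] -= c ; t += 10
  else (none, i, t)
termination_by (pvFront i - c).toNat
decreasing_by
  simp only [pvFront_cons]
  omega

-- A's for loop; acc collects the already-processed (mutated) inner lists.
def pvForA (c : Int) (items : List (List Int)) (t : Int) (acc : List (List Int)) :
    Option Int × List (List Int) × Int :=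
  match items with
  | [] => (none, acc, t)
  | i :: rest =>
    match pvWhileA c i t with
    | (some r, i', t') => (some r, acc ++ i' :: rest, t')
    | (none, i', t') => pvForA c rest t' (acc ++ [i'])

def cycles (lst : List (List Int)) (c : Int) (t : Int) : Int :=
  match pvForA c lst t [] with
  | (some r, _, _) => r
  | (none, lst', t') => t' - pvFront (pyMin lst')

-- ===== PORT B =====
-- best is None or v < best  →  best := v
def pvUpdBest (b : Option Int) (v : Int) : Option Int :=
  match b with
  | none => some v
  | some m => if v < m then some v else some m

def cycles_alt (lst : List (List Int)) (c : Int) (t : Int) : Int :=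
  let r := lst.foldl (fun (acc : Option Int × Int) i =>
      let v := (PySem.List.pyGet? i 0).getD 0      -- v = i[0]
      if v > c then
        let k := -(PySem.Int.floordiv (c - v) c)   -- k = -((c - v) // c)
        (pvUpdBest acc.1 (v - k * c), acc.2 + 10 * k)
      else (pvUpdBest acc.1 v, acc.2)) (none, t)
  r.2 - r.1.getD 0   -- t - best (best = None, i.e. lst = [], is outside Pre_)

-- ===== PRECONDITION & SPEC =====
-- Pre_ excludes exactly the inputs where Python A does not return normally:
-- empty lst (min([]) raises ValueError), an empty inner list (front raises
-- IndexError), and c ≤ 0 with some head > c (the while loop diverges).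
def Pre_cycles (lst : List (List Int)) (c : Int) (t : Int) : Prop :=
  lst ≠ [] ∧ (∀ i ∈ lst, i ≠ []) ∧ (0 < c ∨ ∀ i ∈ lst, i.headI ≤ c)
instance (lst : List (List Int)) (c : Int) (t : Int) : Decidable (Pre_cycles lst c t) := by
  unfold Pre_cycles; infer_instance

def pvWitness_cycles : List (List Int) × Int × Int := ([[25, 1], [3]], 7, 0)

def Spec_cycles (lst : List (List Int)) (c : Int) (t : Int) (out : Int) : Prop := out = cycles_alt lst c t
instance (lst : List (List Int)) (c : Int) (t : Int) (out : Int) : Decidable (Spec_cycles lst c t out) := by unfold Spec_cycles; infer_instance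

-- ===== CLAIM (what is proved, stated in full; the proofs are below) =====
def Claim_equal_cycles : Prop := ∀ (lst : List (List Int)) (c : Int) (t : Int), Dom_cycles lst c t → Pre_cycles lst c t → Spec_cycles lst c t (cycles lst c t)

-- ===== LEMMAS AND PROOFS =====

theorem pyMin_cons (x : List Int) (rest : List (List Int)) :
    pyMin (x :: rest) = rest.foldl (fun m y => if pyListLt y m then y else m) x := rfl

-- the number of subtractions B computes for head v
def pvK (c v : Int) : Int := if v > c then -(PySem.Int.floordiv (c - v) c) else 0

theorem pvK_step (c v : Int) (hc : 0 < c) (hv : v > c) :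
    pvK c v = pvK c (v - c) + 1 := by
  unfold pvK
  by_cases h2 : v - c > c
  · -- floordiv (c - v) c = floordiv (c - (v - c)) c - 1
    simp only [hv, h2, if_pos]
    have hq := (PySem.Int.floordiv_eq_iff_of_pos (a := c - (v - c)) (b := c)
      (q := PySem.Int.floordiv (c - (v - c)) c) hc).mp rfl
    have : PySem.Int.floordiv (c - v) c = PySem.Int.floordiv (c - (v - c)) c - 1 := by
      refine (PySem.Int.floordiv_eq_iff_of_pos hc).mpr ⟨?_, ?_⟩ <;> nlinarith [hq.1, hq.2]
    omega
  · -- c < v ≤ 2c : one subtraction, floordiv (c - v) c = -1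
    have : PySem.Int.floordiv (c - v) c = -1 := by
      refine (PySem.Int.floordiv_eq_iff_of_pos hc).mpr ⟨by nlinarith, by nlinarith⟩
    simp only [hv, if_pos, if_neg h2]
    omega

theorem pvK_of_le (c v : Int) (h : ¬ v > c) : pvK c v = 0 := by
  unfold pvK; simp [h]

-- characterisation of A's while loop via B's closed form
theorem pvWhileA_eq_aux (c : Int) (hc : 0 < c) :
    ∀ (n : Nat) (v : Int), (v - c).toNat = n → ∀ (rest : List Int) (t : Int),
      pvWhileA c (v :: rest) t = (none, (v - pvK c v * c) :: rest, t + 10 * pvK c v) := by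
  intro n
  induction n using Nat.strong_induction_on with
  | _ n ih => ?_
  intro v hn rest t
  rw [pvWhileA]
  by_cases hv : v > c
  · simp only [pvFront_cons]
    rw [dif_pos ⟨hv, hc⟩, if_neg (by omega : ¬ v ≤ c)]
    simp only [List.tail_cons]
    rw [ih ((v - c) - c).toNat (by omega) (v - c) rfl rest (t + 10)]
    rw [pvK_step c v hc hv]
    refine congrArg₂ _ rfl (congrArg₂ _ (congrArg₂ _ (by ring) rfl) (by ring))
  · simp only [pvFront_cons]
    rw [dif_neg (by tauto)]
    rw [pvK_of_le c v hv]
    simp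

theorem pvWhileA_eq (c : Int) (hc : 0 < c) (v : Int) (rest : List Int) (t : Int) :
    pvWhileA c (v :: rest) t = (none, (v - pvK c v * c) :: rest, t + 10 * pvK c v) :=
  pvWhileA_eq_aux c hc _ v rfl rest t

theorem pvWhileA_eq' (c v : Int) (h : 0 < c ∨ v ≤ c) (rest : List Int) (t : Int) :
    pvWhileA c (v :: rest) t = (none, (v - pvK c v * c) :: rest, t + 10 * pvK c v) := by
  by_cases hv : v > c
  · exact pvWhileA_eq c (h.resolve_right (by omega)) v rest t
  · rw [pvWhileA]
    simp only [pvFront_cons]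
    rw [dif_neg (by tauto), pvK_of_le c v hv]
    simp

def pvNewHead (c v : Int) : Int := v - pvK c v * c

theorem pvGetD_head (i : List Int) : (PySem.List.pyGet? i 0).getD 0 = i.headI := by
  cases i <;> simp [PySem.List.pyGet?, PySem.List.pyIdx?]

-- A's for loop: never early-returns under Pre_'s conditions; closed form for list and t
theorem pvForA_eq (c : Int) :
    ∀ (items : List (List Int)) (t : Int) (acc : List (List Int)),
      (∀ i ∈ items, i ≠ []) → (0 < c ∨ ∀ i ∈ items, i.headI ≤ c) →
      pvForA c items t acc =
        (none, acc ++ items.map (fun i => pvNewHead c i.headI :: i.tail),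
         t + 10 * (items.map (fun i => pvK c i.headI)).sum) := by
  intro items
  induction items with
  | nil => intro t acc _ _; simp [pvForA]
  | cons i rest ih =>
    intro t acc hnil hcase
    cases i with
    | nil => exact absurd rfl (hnil [] (List.mem_cons_self))
    | cons v tl =>
      have hvc : 0 < c ∨ v ≤ c := by
        rcases hcase with h | h
        · exact Or.inl h
        · exact Or.inr (by simpa using h (v :: tl) (List.mem_cons_self))
      simp only [pvForA]
      rw [pvWhileA_eq' c v hvc tl t]
      show pvForA c rest (t + 10 * pvK c v) (acc ++ [(v - pvK c v * c) :: tl]) = _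
      rw [ih (t + 10 * pvK c v) (acc ++ [(v - pvK c v * c) :: tl])
        (fun j hj => hnil j (List.mem_cons_of_mem _ hj))
        (hcase.imp id (fun h j hj => h j (List.mem_cons_of_mem _ hj)))]
      simp [pvNewHead]
      ring

-- B's foldl: closed form for the running best and t
theorem pvAltFold (c : Int) :
    ∀ (items : List (List Int)) (b : Option Int) (t : Int),
      items.foldl (fun (acc : Option Int × Int) i =>
        let v := (PySem.List.pyGet? i 0).getD 0
        if v > c then
          let k := -(PySem.Int.floordiv (c - v) c)
          (pvUpdBest acc.1 (v - k * c), acc.2 + 10 * k)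
        else (pvUpdBest acc.1 v, acc.2)) (b, t) =
      (items.foldl (fun bb i => pvUpdBest bb (pvNewHead c i.headI)) b,
       t + 10 * (items.map (fun i => pvK c i.headI)).sum) := by
  intro items
  induction items with
  | nil => intro b t; simp
  | cons i rest ih =>
    intro b t
    rw [List.foldl_cons]
    have hstep : (fun (acc : Option Int × Int) i =>
        let v := (PySem.List.pyGet? i 0).getD 0
        if v > c then
          let k := -(PySem.Int.floordiv (c - v) c)
          (pvUpdBest acc.1 (v - k * c), acc.2 + 10 * k)
        else (pvUpdBest acc.1 v, acc.2)) (b, t) i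
        = (pvUpdBest b (pvNewHead c i.headI), t + 10 * pvK c i.headI) := by
      by_cases hv : i.headI > c <;>
        simp [pvGetD_head, hv, pvK, pvNewHead]
    refine Eq.trans (congrArg (fun z => List.foldl (fun (acc : Option Int × Int) i =>
        let v := (PySem.List.pyGet? i 0).getD 0
        if v > c then
          let k := -(PySem.Int.floordiv (c - v) c)
          (pvUpdBest acc.1 (v - k * c), acc.2 + 10 * k)
        else (pvUpdBest acc.1 v, acc.2)) z rest) hstep) ?_
    show List.foldl _ (pvUpdBest b (pvNewHead c i.headI), t + 10 * pvK c i.headI) rest = _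
    rw [ih, List.foldl_cons, List.map_cons, List.sum_cons]
    exact congrArg₂ Prod.mk rfl (by ring)

-- head comparisons extracted from Python's lexicographic list comparison
theorem pyListLt_front_le {a b : Int} {as bs : List Int}
    (h : pyListLt (a :: as) (b :: bs) = true) : a ≤ b := by
  simp only [pyListLt] at h
  split_ifs at h <;> omega

theorem pyListLt_front_ge {a b : Int} {as bs : List Int}
    (h : pyListLt (a :: as) (b :: bs) = false) : b ≤ a := by
  simp only [pyListLt] at h
  split_ifs at h <;> omega

-- the first element of the lexicographic minimum is the minimum of the first elements
theorem pvFront_foldl_pick :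
    ∀ (ys : List (List Int)) (x : List Int), (∀ y ∈ ys, y ≠ []) → x ≠ [] →
      pvFront (ys.foldl (fun m y => if pyListLt y m then y else m) x) =
        ys.foldl (fun a y => min a (pvFront y)) (pvFront x) := by
  intro ys
  induction ys with
  | nil => intro x _ _; rfl
  | cons y ys ih =>
    intro x hne hx
    obtain ⟨a, as, rfl⟩ : ∃ a as, x = a :: as := by
      cases x with
      | nil => exact absurd rfl hx
      | cons a as => exact ⟨a, as, rfl⟩
    obtain ⟨b, bs, rfl⟩ : ∃ b bs, y = b :: bs := by
      cases hy : y with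
      | nil => exact absurd hy (hne y (List.mem_cons_self))
      | cons b bs => exact ⟨b, bs, rfl⟩
    have hmin : pvFront (if pyListLt (b :: bs) (a :: as) then b :: bs else a :: as)
        = min (pvFront (a :: as)) (pvFront (b :: bs)) := by
      by_cases h : pyListLt (b :: bs) (a :: as)
      · have := pyListLt_front_le (h := h)
        simp only [if_pos h, pvFront_cons]; omega
      · have hf : pyListLt (b :: bs) (a :: as) = false := by simpa using h
        have := pyListLt_front_ge (h := hf)
        simp only [if_neg h, pvFront_cons]; omega
    rw [List.foldl_cons, List.foldl_cons]
    rw [ih (if pyListLt (b :: bs) (a :: as) then b :: bs else a :: as)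
      (fun j hj => hne j (List.mem_cons_of_mem _ hj))
      (by split <;> simp), hmin]

-- B's running best over nonempty input is `some` of the running min
theorem pvBestFold_some (c : Int) :
    ∀ (items : List (List Int)) (m : Int),
      items.foldl (fun bb i => pvUpdBest bb (pvNewHead c i.headI)) (some m) =
        some (items.foldl (fun a i => min a (pvNewHead c i.headI)) m) := by
  intro items
  induction items with
  | nil => intro m; rfl
  | cons i rest ih =>
    intro m
    rw [List.foldl_cons, List.foldl_cons]
    have : pvUpdBest (some m) (pvNewHead c i.headI) = some (min m (pvNewHead c i.headI)) := by
      unfold pvUpdBest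
      by_cases h : pvNewHead c i.headI < m <;> simp [h] <;> omega
    rw [this, ih]

-- ===== VERDICT (by name: the statement is the Claim_ definition above) =====
theorem cycles_spec : Claim_equal_cycles := by
  intro lst c t _ hpre
  obtain ⟨hne, hnil, hcase⟩ := hpre
  obtain ⟨i0, rest, rfl⟩ : ∃ i0 rest, lst = i0 :: rest := by
    cases lst with
    | nil => exact absurd rfl hne
    | cons i0 rest => exact ⟨i0, rest, rfl⟩
  unfold Spec_cycles cycles cycles_alt
  rw [pvForA_eq c (i0 :: rest) t [] hnil hcase]
  rw [pvAltFold c (i0 :: rest) none t]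
  show t + 10 * _ - pvFront (pyMin _) = _
  simp only [List.nil_append, List.map_cons]
  rw [pyMin_cons]
  rw [pvFront_foldl_pick (rest.map (fun i => pvNewHead c i.headI :: i.tail))
    (pvNewHead c i0.headI :: i0.tail) (by intro y hy; simp at hy; obtain ⟨j, _, rfl⟩ := hy; simp)
    (by simp)]
  rw [List.foldl_cons]
  show _ = _ - ((rest.foldl (fun bb i => pvUpdBest bb (pvNewHead c i.headI))
      (pvUpdBest none (pvNewHead c i0.headI)))).getD 0
  rw [show pvUpdBest none (pvNewHead c i0.headI) = some (pvNewHead c i0.headI) from rfl]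
  rw [pvBestFold_some c rest (pvNewHead c i0.headI)]
  rw [List.foldl_map]
  simp [pvFront_cons]
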